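-- pv_equiv track=rewrite | github.com/iamhduy/leetcode-prac | finished/tiktokOA.py | gameGuesser
-- ===== SOURCE A (Python) =====
-- def gameGuesser(str_, num_):
--     pair_count = 0
--     tracking_list = list()
--     for i in range(len(str_)):
--         if tracking_list and tracking_list[-1][0] == str_[i]:
--             pair_count += 1
--             tracking_list.pop()
--         else:
--             tracking_list.append([str_[i], i])
--
--     return num_ if not (pair_count + 1) % num_ else (pair_count + 1) % num_
-- ===== SOURCE B (Python) =====
-- def gameGuesser(str_, num_):
--     # Full adjacent-pair reduction by repeated single passes (no stack);
--     # pair count recovered from the length of the fully reduced sequence.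
--     s = list(str_)
--     while True:
--         new = _one_pass(s)
--         if len(new) == len(s):
--             break
--         s = new
--     pair_count = (len(str_) - len(s)) // 2
--     return num_ if not (pair_count + 1) % num_ else (pair_count + 1) % num_
--
--
-- def _one_pass(s):
--     out = []
--     i = 0
--     while i < len(s):
--         if i + 1 < len(s) and s[i] == s[i + 1]:
--             i += 2
--         else:
--             out.append(s[i])
--             i += 1
--     return out
-- ===== Notes on version B (the rewrite author's own statement) =====
-- stated objective: alternative
-- what changed: Replaces the single-pass stack (push/pop with stored indices) by repeated full passes that delete adjacent equal pairs until the sequence is stable; the pair count is recovered arithmetically from the reduced length, relying on confluence of adjacent-pair cancellation.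
import Mathlib
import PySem

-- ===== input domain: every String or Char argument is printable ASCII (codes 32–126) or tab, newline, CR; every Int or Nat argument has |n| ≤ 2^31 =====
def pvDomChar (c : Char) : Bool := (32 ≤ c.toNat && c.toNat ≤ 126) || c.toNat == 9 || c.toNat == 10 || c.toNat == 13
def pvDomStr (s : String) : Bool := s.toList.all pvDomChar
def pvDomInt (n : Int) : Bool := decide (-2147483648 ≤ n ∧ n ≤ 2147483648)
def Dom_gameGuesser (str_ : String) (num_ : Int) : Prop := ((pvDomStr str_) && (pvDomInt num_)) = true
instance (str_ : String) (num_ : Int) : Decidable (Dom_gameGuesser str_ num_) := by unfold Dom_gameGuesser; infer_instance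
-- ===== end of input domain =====

-- B replaces A's stack by repeated whole-sequence passes deleting adjacent equal
-- pairs until stable (alternative decomposition, not faster).

-- ===== PORT A =====
-- one loop iteration of A: state is (pair_count, tracking_list), stack kept head-first
def gameGuesserStep (st : Int × List (Char × Int)) (ci : Int × Char) : Int × List (Char × Int) :=
  match st with
  | (pc, tl) =>
    match tl with
    | (c, _) :: rest =>
      if c = ci.2 then (pc + 1, rest) else (pc, (ci.2, ci.1) :: tl)
    | [] => (pc, (ci.2, ci.1) :: tl)

def gameGuesser (str_ : String) (num_ : Int) : Int :=
  let r := (PySem.List.enumerate str_.toList 0).foldl gameGuesserStep (0, [])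
  let pair_count := r.1
  if PySem.Int.mod (pair_count + 1) num_ = 0 then num_
  else PySem.Int.mod (pair_count + 1) num_

-- ===== PORT B =====
-- one left-to-right pass deleting adjacent equal pairs (B's _one_pass)
def onePass : List Char → List Char
  | [] => []
  | [a] => [a]
  | a :: b :: t => if a = b then onePass t else a :: onePass (b :: t)

theorem onePass_length_le (xs : List Char) : (onePass xs).length ≤ xs.length := by
  induction xs using onePass.induct with
  | case1 => simp [onePass]
  | case2 a => simp [onePass]
  | case3 b t ih => rw [onePass, if_pos rfl]; simp only [List.length_cons]; omega
  | case4 a b t h ih =>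
    rw [onePass, if_neg h]
    simp only [List.length_cons] at ih ⊢
    omega

-- B's while loop: repeat onePass until the length is stable
def reduceFix (xs : List Char) : List Char :=
  if (onePass xs).length = xs.length then xs else reduceFix (onePass xs)
termination_by xs.length
decreasing_by
  have := onePass_length_le xs
  omega

def gameGuesser_alt (str_ : String) (num_ : Int) : Int :=
  let s := reduceFix str_.toList
  let pair_count : Int :=
    PySem.Int.floordiv ((str_.toList.length : Int) - (s.length : Int)) 2
  if PySem.Int.mod (pair_count + 1) num_ = 0 then num_
  else PySem.Int.mod (pair_count + 1) num_

-- ===== PRECONDITION & SPEC =====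
-- Python A raises ZeroDivisionError iff num_ == 0 (the final '% num_')
def Pre_gameGuesser (str_ : String) (num_ : Int) : Prop := num_ ≠ 0
instance (str_ : String) (num_ : Int) : Decidable (Pre_gameGuesser str_ num_) := by
  unfold Pre_gameGuesser; infer_instance

def pvWitness_gameGuesser : String × Int := ("abba", 3)

def Spec_gameGuesser (str_ : String) (num_ : Int) (out : Int) : Prop := out = gameGuesser_alt str_ num_
instance (str_ : String) (num_ : Int) (out : Int) : Decidable (Spec_gameGuesser str_ num_ out) := by unfold Spec_gameGuesser; infer_instance

-- ===== CLAIM (what is proved, stated in full; the proofs are below) =====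
def Claim_equal_gameGuesser : Prop := ∀ (str_ : String) (num_ : Int), Dom_gameGuesser str_ num_ → Pre_gameGuesser str_ num_ → Spec_gameGuesser str_ num_ (gameGuesser str_ num_)

-- ===== LEMMAS AND PROOFS =====

-- the character action of A's stack step
def cstep (st : List Char) (a : Char) : List Char :=
  match st with
  | c :: r => if c = a then r else a :: c :: r
  | [] => [a]

-- no two adjacent equal characters
def irr : List Char → Prop
  | a :: b :: t => a ≠ b ∧ irr (b :: t)
  | _ => True

theorem irr_tail {a : Char} {l : List Char} (h : irr (a :: l)) : irr l := by
  cases l with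
  | nil => trivial
  | cons b t => exact h.2

theorem irr_append_right (u v : List Char) (h : irr (u ++ v)) : irr v := by
  induction u with
  | nil => exact h
  | cons x u' ih => exact ih (irr_tail h)

theorem irr_iff_chain (l : List Char) : irr l ↔ List.IsChain (fun a b => a ≠ b) l := by
  induction l with
  | nil => simp [irr]
  | cons a t ih =>
    cases t with
    | nil => simp [irr]
    | cons b t' =>
      rw [List.isChain_cons_cons, ← ih]
      exact Iff.rfl

theorem irr_reverse {l : List Char} (h : irr l) : irr l.reverse := by
  rw [irr_iff_chain] at h ⊢
  rw [List.isChain_reverse]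
  exact h.imp (fun a b hab he => hab he.symm)

theorem cstep_irr {st : List Char} (a : Char) (h : irr st) : irr (cstep st a) := by
  cases st with
  | nil => simp [cstep, irr]
  | cons c r =>
    by_cases hc : c = a
    · simp only [cstep, if_pos hc]; exact irr_tail h
    · simp only [cstep, if_neg hc]
      exact ⟨fun he => hc he.symm, h⟩

theorem cstep_cstep {st : List Char} (a : Char) (h : irr st) : cstep (cstep st a) a = st := by
  cases st with
  | nil => simp [cstep]
  | cons c r =>
    by_cases hc : c = a
    · subst hc
      simp only [cstep, if_pos rfl]
      cases r with
      | nil => simp [cstep]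
      | cons d r' =>
        have hd : ¬ d = c := fun he => h.1 he.symm
        simp [cstep, hd]
    · simp [cstep, hc]

-- A's fold: the stack's characters follow cstep, and the counting invariant holds
theorem foldA_spec (l : List (Int × Char)) :
    ∀ (pc : Int) (tl : List (Char × Int)),
      ((l.foldl gameGuesserStep (pc, tl)).2).map Prod.fst
        = List.foldl cstep (tl.map Prod.fst) (l.map Prod.snd)
      ∧ 2 * (l.foldl gameGuesserStep (pc, tl)).1
          + (((l.foldl gameGuesserStep (pc, tl)).2).length : Int)
        = 2 * pc + (tl.length : Int) + (l.length : Int) := by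
  induction l with
  | nil => intro pc tl; simp
  | cons x l ih =>
    intro pc tl
    simp only [List.foldl_cons, List.map_cons, List.length_cons]
    cases tl with
    | nil =>
      have h := ih pc [(x.2, x.1)]
      constructor
      · simpa [gameGuesserStep, cstep] using h.1
      · have h2 := h.2
        simp only [gameGuesserStep]
        simp only [List.length_cons, List.length_nil] at h2 ⊢
        push_cast at h2 ⊢
        omega
    | cons p rest =>
      obtain ⟨c, d⟩ := p
      by_cases hc : c = x.2
      · have h := ih (pc + 1) rest
        constructor
        · simpa [gameGuesserStep, cstep, hc] using h.1
        · have h2 := h.2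
          simp only [gameGuesserStep, if_pos hc]
          simp only [List.length_cons] at h2 ⊢
          push_cast at h2 ⊢
          omega
      · have h := ih pc ((x.2, x.1) :: (c, d) :: rest)
        constructor
        · simpa [gameGuesserStep, cstep, hc] using h.1
        · have h2 := h.2
          simp only [gameGuesserStep, if_neg hc]
          simp only [List.length_cons] at h2 ⊢
          push_cast at h2 ⊢
          omega

-- one pass does not change the cstep-fold result (from an irreducible stack)
theorem foldl_cstep_onePass (xs : List Char) :
    ∀ st, irr st → List.foldl cstep st (onePass xs) = List.foldl cstep st xs := by
  induction xs using onePass.induct with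
  | case1 => intro st _; simp [onePass]
  | case2 a => intro st _; simp [onePass]
  | case3 b t ih =>
    intro st hst
    rw [onePass, if_pos rfl]
    simp only [List.foldl_cons]
    rw [ih st hst, cstep_cstep b hst]
  | case4 a b t h ih =>
    intro st hst
    rw [onePass, if_neg h]
    simp only [List.foldl_cons]
    exact ih (cstep st a) (cstep_irr a hst)

-- a pass that removes nothing certifies irreducibility
theorem onePass_len_eq_irr (xs : List Char) (h : (onePass xs).length = xs.length) : irr xs := by
  induction xs using onePass.induct with
  | case1 => trivial
  | case2 a => trivial
  | case3 b t ih =>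
    exfalso
    have := onePass_length_le t
    rw [onePass, if_pos rfl] at h
    have hlen : (b :: b :: t).length = t.length + 2 := by simp
    omega
  | case4 a b t hab ih =>
    rw [onePass, if_neg hab] at h
    simp only [List.length_cons] at h
    exact ⟨hab, ih (by simp only [List.length_cons]; omega)⟩

-- folding cstep over an irreducible word reverses it onto the stack
theorem foldl_cstep_irr (xs : List Char) :
    ∀ st, irr (xs.reverse ++ st) → List.foldl cstep st xs = xs.reverse ++ st := by
  induction xs with
  | nil => intro st _; simp
  | cons a t ih =>
    intro st h
    have h' : irr (t.reverse ++ a :: st) := by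
      simpa [List.append_assoc] using h
    have hast : irr (a :: st) := irr_append_right _ _ h'
    have hstep : cstep st a = a :: st := by
      cases st with
      | nil => simp [cstep]
      | cons c r =>
        have : ¬ c = a := fun he => hast.1 he.symm
        simp [cstep, this]
    simp only [List.foldl_cons, hstep]
    rw [ih (a :: st) h']
    simp

-- reduceFix preserves the cstep-fold result and ends irreducible
theorem reduceFix_spec (n : Nat) : ∀ (xs : List Char), xs.length ≤ n →
    List.foldl cstep [] (reduceFix xs) = List.foldl cstep [] xs ∧ irr (reduceFix xs) := by
  induction n with
  | zero =>
    intro xs hle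
    have : xs = [] := List.length_eq_zero_iff.mp (Nat.le_zero.mp hle)
    subst this
    rw [reduceFix]
    simp [onePass, irr]
  | succ n ih =>
    intro xs hle
    rw [reduceFix]
    by_cases hy : (onePass xs).length = xs.length
    · rw [if_pos hy]
      exact ⟨rfl, onePass_len_eq_irr xs hy⟩
    · simp only [if_neg hy]
      have hlt := onePass_length_le xs
      have h := ih (onePass xs) (by omega)
      refine ⟨?_, h.2⟩
      rw [h.1]
      exact foldl_cstep_onePass xs [] trivial

theorem reduceFix_length (xs : List Char) :
    (List.foldl cstep [] xs).length = (reduceFix xs).length := by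
  obtain ⟨h1, h2⟩ := reduceFix_spec xs.length xs le_rfl
  have hrev := foldl_cstep_irr (reduceFix xs) [] (by simpa using irr_reverse h2)
  rw [← h1, hrev]
  simp

-- ===== VERDICT (by name: the statement is the Claim_ definition above) =====
theorem gameGuesser_spec : Claim_equal_gameGuesser := by
  intro str_ num_ _ _
  unfold Spec_gameGuesser gameGuesser gameGuesser_alt
  have hA := foldA_spec (PySem.List.enumerate str_.toList 0) 0 []
  rw [PySem.List.map_snd_enumerate] at hA
  simp only [List.map_nil, List.length_nil] at hA
  have hlen : (((PySem.List.enumerate str_.toList 0).foldl gameGuesserStep (0, [])).2).length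
      = (List.foldl cstep [] str_.toList).length := by
    rw [← hA.1, List.length_map]
  have hcnt := hA.2
  rw [hlen] at hcnt
  simp only [PySem.List.length_enumerate] at hcnt
  have hred := reduceFix_length str_.toList
  have hfd : PySem.Int.floordiv
      ((str_.toList.length : Int) - ((reduceFix str_.toList).length : Int)) 2
      = ((PySem.List.enumerate str_.toList 0).foldl gameGuesserStep (0, [])).1 := by
    rw [PySem.Int.floordiv_eq_ediv_of_pos (by norm_num)]
    omega
  simp only [hfd]
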